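-- pv_equiv track=rewrite | github.com/alexandraback/datacollection | solutions_5738606668808192_1/Python/powerset/filereader.py | solve
-- ===== SOURCE A (Python) =====
-- def solve(N, J):
--     scount = 0
--     solution = ""
--     for i in range(2**(N-1) + 1, 2**N, 2):
--         if scount == J:
--             print ("Finished: " + str(scount) )
--             return solution
--         divisors = []
--         coin = bin(i)[2:]
--         for j in range (2,11):
--             basecoin = int(coin, j)
--             for k in range(2, 2**15):
--                 if basecoin % k == 0:
--                     #print ( coin + " (" + str(basecoin) + ") is divisible by: " + str(k) )
--                     divisors.append(str(k) )
--                     break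
--             if j > len(divisors) + 1:
--                 #print "do we get here? ", str(j), " ".join(divisors)
--                 break
--             if len(divisors) == 9:
--                 solution += coin + " " + " ".join(divisors) + "\n"
--                 scount += 1
--                 print ( coin + " " + " ".join(divisors) + "\n" )
-- ===== SOURCE B (Python) =====
-- def _primes_below(limit):
--     # trial division by the primes already found, stopping at sqrt(k)
--     primes = []
--     for k in range(2, limit):
--         is_p = True
--         for p in primes:
--             if p * p > k:
--                 break
--             if k % p == 0:
--                 is_p = False
--                 break
--         if is_p:
--             primes.append(k)
--     return primes
--
--
-- def _divisors_of(coin, primes):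
--     # smallest divisor (>= 2, < limit) of each base-j reading, or None if some
--     # base has none below the limit; the smallest divisor is always prime
--     divs = []
--     for j in range(2, 11):
--         basecoin = int(coin, j)
--         for p in primes:
--             if basecoin % p == 0:
--                 divs.append(str(p))
--                 break
--         else:
--             return None
--     return divs
--
--
-- def solve(N, J):
--     primes = _primes_below(2 ** 15)
--     scount = 0
--     solution = ""
--     for i in range(2 ** (N - 1) + 1, 2 ** N, 2):
--         if scount == J:
--             print("Finished: " + str(scount))
--             return solution
--         coin = bin(i)[2:]
--         divs = _divisors_of(coin, primes)
--         if divs is not None: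
--             solution += coin + " " + " ".join(divs) + "\n"
--             scount += 1
--             print(coin + " " + " ".join(divs) + "\n")
-- ===== Notes on version B (the rewrite author's own statement) =====
-- stated objective: faster
-- what changed: B precomputes the list of all primes below 2**15 once (trial division by already-found primes up to sqrt) and finds each basecoin's smallest divisor by scanning only that prime list via an all-or-nothing per-coin helper, instead of A scanning every integer in [2, 2**15) for every base with len(divisors) bookkeeping; the smallest divisor >= 2 is always prime, so the recorded divisors are identical.
import Mathlib
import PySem

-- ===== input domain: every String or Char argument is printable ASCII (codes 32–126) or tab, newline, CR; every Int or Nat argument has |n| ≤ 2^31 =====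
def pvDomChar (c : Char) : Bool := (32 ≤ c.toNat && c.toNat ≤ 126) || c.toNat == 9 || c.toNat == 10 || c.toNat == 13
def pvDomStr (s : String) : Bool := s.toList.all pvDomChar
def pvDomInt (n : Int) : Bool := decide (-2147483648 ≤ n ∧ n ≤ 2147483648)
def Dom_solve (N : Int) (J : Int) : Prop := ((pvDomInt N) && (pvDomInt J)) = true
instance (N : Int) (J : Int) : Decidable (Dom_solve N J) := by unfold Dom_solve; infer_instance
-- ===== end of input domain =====

-- B replaces A's per-base scan of every integer in [2, 2^15) by one precomputed
-- table of the primes below 2^15 and a scan of that table (the smallest divisor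
-- ≥ 2 of any number is prime, so the recorded divisor strings are identical).
-- Equivalence is about the RETURN value only; both Pythons also print progress lines.

-- ===== PORT A =====
-- coin = bin(i)[2:]   (shared verbatim by both Pythons)
def pvCoin (i : Int) : String := PySem.Str.slice (PySem.Int.pyBin i) (some 2) none

-- basecoin = int(coin, j); on every coin both programs build (a nonempty 0/1
-- string starting with '1') the parse succeeds, so the `.getD 0` default is unreachable
def pvBase (coin : String) (j : Int) : Int := (PySem.Int.ofStrBase? coin j).getD 0

-- A's inner loop: 'for k in range(2, 2**15): if basecoin % k == 0: append; break'
def pvFindDivA (n : Int) : Option Int :=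
  (PySem.List.pyRange 2 (2 ^ 15) 1).find? (fun k => PySem.Int.mod n k == 0)

-- A's loop over bases j in range(2, 11), threading (divisors, solution, scount),
-- with the 'j > len(divisors) + 1' break; returns (solution, scount)
def pvLoopJA : List Int → String → List String → String → Int → (String × Int)
  | [], _, _, solution, scount => (solution, scount)
  | j :: js, coin, divisors, solution, scount =>
    let basecoin := pvBase coin j
    let divisors := match pvFindDivA basecoin with
      | some k => divisors ++ [PySem.Int.toStr k]
      | none => divisors
    if j > (divisors.length : Int) + 1 then (solution, scount)
    else if divisors.length == 9 then
      pvLoopJA js coin divisors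
        (solution ++ coin ++ " " ++ PySem.Str.join " " divisors ++ "\n") (scount + 1)
    else pvLoopJA js coin divisors solution scount

-- A's outer loop over odd candidates i, with the early 'return solution';
-- falling off the loop returns Python's implicit None
-- 'for i in range(start, stop, 2)' as the numeric loop it is (lazy, like Python's range)
def pvLoopIA (stop : Int) (J : Int) (i : Int) (solution : String) (scount : Int) :
    Option String :=
  if h : i < stop then
    if scount == J then some solution
    else
      let r := pvLoopJA (PySem.List.pyRange 2 11 1) (pvCoin i) [] solution scount
      pvLoopIA stop J (i + 2) r.1 r.2
  else none
termination_by (stop - i).toNat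
decreasing_by omega

def solve (N : Int) (J : Int) : Option String :=
  -- (N-1).toNat, N.toNat are exact for N ≥ 1 (Pre_solve); for N ≤ 0 Python raises
  pvLoopIA (2 ^ N.toNat) J (2 ^ (N - 1).toNat + 1) "" 0

-- ===== PORT B =====
-- B's prime table: trial division of each k by the primes already found, up to sqrt(k)
def pvTrial : List Int → Int → Bool
  | [], _ => true
  | p :: ps, k =>
    if p * p > k then true
    else if PySem.Int.mod k p == 0 then false
    else pvTrial ps k

def pvPrimesBelow (limit : Int) : List Int :=
  (PySem.List.pyRange 2 limit 1).foldl
    (fun acc k => if pvTrial acc k then acc ++ [k] else acc) []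

-- B's inner loop: 'for p in primes: if basecoin % p == 0: append; break'
def pvFindDivB (primes : List Int) (n : Int) : Option Int :=
  primes.find? (fun p => PySem.Int.mod n p == 0)

-- B's _divisors_of: the smallest prime divisor of each base reading, None as soon as one base has none
def pvDivsB (primes : List Int) : List Int → String → Option (List String)
  | [], _ => some []
  | j :: js, coin =>
    (pvFindDivB primes (pvBase coin j)).bind fun p =>
      (pvDivsB primes js coin).map fun ds => PySem.Int.toStr p :: ds

def pvLoopIB (primes : List Int) (stop : Int) (J : Int) (i : Int) (solution : String)
    (scount : Int) : Option String :=
  if h : i < stop then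
    if scount == J then some solution
    else
      let coin := pvCoin i
      (pvDivsB primes (PySem.List.pyRange 2 11 1) coin).elim
        (pvLoopIB primes stop J (i + 2) solution scount)
        (fun ds =>
          pvLoopIB primes stop J (i + 2)
            (solution ++ coin ++ " " ++ PySem.Str.join " " ds ++ "\n") (scount + 1))
  else none
termination_by (stop - i).toNat
decreasing_by all_goals omega

def solve_alt (N : Int) (J : Int) : Option String :=
  let primes := pvPrimesBelow (2 ^ 15)
  pvLoopIB primes (2 ^ N.toNat) J (2 ^ (N - 1).toNat + 1) "" 0

-- ===== PRECONDITION & SPEC =====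
-- A (and B) raise a TypeError for N ≤ 0: 2**(N-1) is then a float and range() rejects it.
def Pre_solve (N : Int) (J : Int) : Prop := 1 ≤ N
instance (N : Int) (J : Int) : Decidable (Pre_solve N J) := by unfold Pre_solve; infer_instance

def pvWitness_solve : Int × Int := (3, 1)

def Spec_solve (N : Int) (J : Int) (out : Option String) : Prop := out = solve_alt N J
instance (N : Int) (J : Int) (out : Option String) : Decidable (Spec_solve N J out) := by
  unfold Spec_solve; infer_instance

-- ===== CLAIM (what is proved, stated in full; the proofs are below) =====
def Claim_equal_solve : Prop :=
  ∀ (N : Int) (J : Int), Dom_solve N J → Pre_solve N J → Spec_solve N J (solve N J)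

-- ===== LEMMAS AND PROOFS =====

-- 'a % p == 0' in either inner loop is divisibility
theorem pvMod_beq_iff (a b : Int) : (PySem.Int.mod a b == 0) = true ↔ b ∣ a := by
  simp [PySem.Int.mod_eq_zero_iff_dvd]

-- trial division never reports a prime composite: y ∈ L with y² ≤ k, y ∣ k forces false
theorem pvTrial_false {L : List Int} (hL : L.Pairwise (· < ·)) (hpos : ∀ p ∈ L, 0 < p)
    {k y : Int} (hyL : y ∈ L) (hysq : y * y ≤ k) (hdvd : y ∣ k) : pvTrial L k = false := by
  induction L with
  | nil => cases hyL
  | cons p ps ih =>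
    rcases List.pairwise_cons.mp hL with ⟨hlt, hps⟩
    rcases List.mem_cons.mp hyL with rfl | hmem
    · have h1 : ¬ (y * y > k) := by omega
      have h2 : (PySem.Int.mod k y == 0) = true := (pvMod_beq_iff k y).mpr hdvd
      simp [pvTrial, h1, h2]
    · have hpylt : p < y := hlt y hmem
      have hppos : 0 < p := hpos p List.mem_cons_self
      have hpsq : ¬ (p * p > k) := by nlinarith
      by_cases hpd : (PySem.Int.mod k p == 0) = true
      · simp [pvTrial, hpsq, hpd]
      · simp only [pvTrial, if_neg hpsq, if_neg hpd]
        exact ih hps (fun q hq => hpos q (List.mem_cons_of_mem p hq)) hmem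

-- trial division never rejects k when no listed prime divides it
theorem pvTrial_true {L : List Int} {k : Int} (h : ∀ p ∈ L, ¬ p ∣ k) : pvTrial L k = true := by
  induction L with
  | nil => rfl
  | cons p ps ih =>
    have hnd : ¬ (PySem.Int.mod k p == 0) = true := fun hc =>
      h p List.mem_cons_self ((pvMod_beq_iff k p).mp hc)
    by_cases hsq : p * p > k
    · simp [pvTrial, hsq]
    · simp only [pvTrial, if_neg hsq, if_neg hnd]
      exact ih fun q hq => h q (List.mem_cons_of_mem p hq)

-- the prime table so far decides primality of the next candidate
theorem pvTrial_correct (k : Int) (hk : 2 ≤ k) :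
    pvTrial ((PySem.List.pyRange 2 k 1).filter (fun p => decide (Nat.Prime p.natAbs))) k
      = decide (Nat.Prime k.natAbs) := by
  set P : List Int := (PySem.List.pyRange 2 k 1).filter (fun p => decide (Nat.Prime p.natAbs)) with hP
  have hmemP : ∀ p ∈ P, (2 ≤ p ∧ p < k) ∧ Nat.Prime p.natAbs := by
    intro p hp
    rcases List.mem_filter.mp hp with ⟨hpr, hdec⟩
    exact ⟨(PySem.List.mem_pyRange_one).mp hpr, of_decide_eq_true hdec⟩
  by_cases hprime : Nat.Prime k.natAbs
  · rw [decide_eq_true hprime]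
    apply pvTrial_true
    intro p hp hdvd
    rcases hmemP p hp with ⟨⟨hp2, hpk⟩, hpp⟩
    have hdn : p.natAbs ∣ k.natAbs := Int.natAbs_dvd_natAbs.mpr hdvd
    rcases (Nat.Prime.eq_one_or_self_of_dvd hprime _ hdn) with h1 | hself
    · exact Nat.Prime.ne_one hpp h1
    · have : p = k := by omega
      omega
  · rw [decide_eq_false hprime]
    set d : Nat := k.natAbs.minFac with hd
    have hne1 : k.natAbs ≠ 1 := by omega
    have hdp : Nat.Prime d := Nat.minFac_prime hne1
    have hddvd : d ∣ k.natAbs := Nat.minFac_dvd _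
    have hd2 : 2 ≤ d := hdp.two_le
    have hdsq : d ^ 2 ≤ k.natAbs := Nat.minFac_sq_le_self (by omega) hprime
    have hdk : (d : Int) < k := by
      have : d < d ^ 2 := by nlinarith
      omega
    have hmem : (d : Int) ∈ P := by
      rw [hP]
      refine List.mem_filter.mpr ⟨(PySem.List.mem_pyRange_one).mpr ⟨by exact_mod_cast hd2, hdk⟩, ?_⟩
      simp [hdp]
    apply pvTrial_false (List.Pairwise.filter _ (PySem.List.pairwise_lt_pyRange_one 2 k))
      (fun p hp => by have := hmemP p hp; omega) hmem
    · have : (d : Int) * d ≤ (k.natAbs : Int) := by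
        have := hdsq; push_cast; nlinarith [hdsq]
      omega
    · have : (d : Int) ∣ (k.natAbs : Int) := Int.natCast_dvd_natCast.mpr hddvd
      rwa [Int.natAbs_of_nonneg (by omega)] at this

-- B's table is exactly the primes below 2^15, in increasing order
theorem pvPrimes_eq :
    pvPrimesBelow (2 ^ 15)
      = (PySem.List.pyRange 2 (2 ^ 15) 1).filter (fun p => decide (Nat.Prime p.natAbs)) := by
  have main : ∀ m : Nat,
      (PySem.List.pyRange 2 (2 + m) 1).foldl
          (fun acc k => if pvTrial acc k then acc ++ [k] else acc) []
        = (PySem.List.pyRange 2 (2 + m) 1).filter (fun p => decide (Nat.Prime p.natAbs)) := by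
    intro m
    induction m with
    | zero => rw [PySem.List.pyRange_one_eq_nil (by omega)]; rfl
    | succ n ih =>
      have hsplit : PySem.List.pyRange 2 (2 + (n + 1 : Nat)) 1
          = PySem.List.pyRange 2 (2 + n) 1 ++ [(2 + n : Int)] := by
        have h := PySem.List.pyRange_one_succ_right (a := 2) (b := (2 + n : Int)) (by omega)
        have harg : (2 : Int) + (n + 1 : Nat) = (2 + n : Int) + 1 := by push_cast; ring
        rw [harg, h]
      rw [hsplit, List.foldl_append, List.filter_append, ih]
      simp only [List.foldl_cons, List.foldl_nil]
      rw [pvTrial_correct (2 + n) (by omega)]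
      by_cases hp : Nat.Prime (2 + n : Int).natAbs
      · simp [hp]
      · simp [hp]
  have h15 : (2 : Int) ^ 15 = 2 + (32766 : Nat) := by norm_num
  unfold pvPrimesBelow
  rw [h15, main 32766]

-- first satisfying element of a strictly increasing list
theorem pvFind?_of_pairwise {L : List Int} (hL : L.Pairwise (· < ·)) {p : Int → Bool} {x : Int}
    (hx : x ∈ L) (hpx : p x = true) (hmin : ∀ y ∈ L, y < x → p y = false) :
    L.find? p = some x := by
  induction L with
  | nil => cases hx
  | cons a t ih =>
    rcases List.pairwise_cons.mp hL with ⟨hlt, ht⟩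
    rcases List.mem_cons.mp hx with rfl | hmem
    · exact List.find?_cons_of_pos hpx
    · have hax : a < x := hlt x hmem
      rw [List.find?_cons_of_neg (by simp [hmin a List.mem_cons_self hax])]
      exact ih ht hmem fun y hy hyx => hmin y (List.mem_cons_of_mem a hy) hyx

-- the key fact: the first divisor in [2, 2^15) is the first prime divisor
theorem pvFindDiv_eq (n : Int) : pvFindDivA n = pvFindDivB (pvPrimesBelow (2 ^ 15)) n := by
  unfold pvFindDivA pvFindDivB
  rw [pvPrimes_eq]
  set R : List Int := PySem.List.pyRange 2 (2 ^ 15) 1 with hR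
  set q : Int → Bool := fun k => PySem.Int.mod n k == 0 with hq
  have hmemR : ∀ k ∈ R, 2 ≤ k ∧ k < 2 ^ 15 := fun k hk => (PySem.List.mem_pyRange_one).mp hk
  have hdvd_iff : ∀ k : Int, q k = true ↔ k ∣ n := fun k => pvMod_beq_iff n k
  by_cases h1 : n.natAbs = 1
  · have hnone : ∀ k ∈ R, ¬ q k = true := by
      intro k hk hc
      have : k.natAbs ∣ n.natAbs := Int.natAbs_dvd_natAbs.mpr ((hdvd_iff k).mp hc)
      rw [h1] at this
      have := Nat.le_of_dvd one_pos this
      have := hmemR k hk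
      omega
    rw [List.find?_eq_none.mpr hnone,
      List.find?_eq_none.mpr fun k hk => hnone k (List.mem_of_mem_filter hk)]
  · set d : Nat := n.natAbs.minFac with hd
    have hdp : Nat.Prime d := Nat.minFac_prime h1
    have hd2 : 2 ≤ d := hdp.two_le
    have hddvd : (d : Int) ∣ n := (Int.natAbs_dvd_natAbs (a := (d : Int))).mp
      (by simpa using Nat.minFac_dvd n.natAbs)
    have hminle : ∀ y : Int, 2 ≤ y → q y = true → (d : Int) ≤ y := by
      intro y hy2 hqy
      have : y.natAbs ∣ n.natAbs := Int.natAbs_dvd_natAbs.mpr ((hdvd_iff y).mp hqy)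
      have := Nat.minFac_le_of_dvd (by omega) this
      omega
    by_cases hlt : (d : Int) < 2 ^ 15
    · have hmemRd : (d : Int) ∈ R := (PySem.List.mem_pyRange_one).mpr ⟨by exact_mod_cast hd2, hlt⟩
      have hqd : q (d : Int) = true := (hdvd_iff _).mpr hddvd
      have hmin : ∀ y ∈ R, y < (d : Int) → q y = false := by
        intro y hy hylt
        by_contra hc
        have : q y = true := by simpa using hc
        have := hminle y (hmemR y hy).1 this
        omega
      rw [pvFind?_of_pairwise (PySem.List.pairwise_lt_pyRange_one 2 (2 ^ 15)) hmemRd hqd hmin,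
        pvFind?_of_pairwise (List.Pairwise.filter _ (PySem.List.pairwise_lt_pyRange_one 2 (2 ^ 15)))
          (List.mem_filter.mpr ⟨hmemRd, by simp [hdp]⟩) hqd
          fun y hy hylt => hmin y (List.mem_of_mem_filter hy) hylt]
    · have hnone : ∀ k ∈ R, ¬ q k = true := by
        intro k hk hc
        have := hminle k (hmemR k hk).1 hc
        have := hmemR k hk
        omega
      rw [List.find?_eq_none.mpr hnone,
        List.find?_eq_none.mpr fun k hk => hnone k (List.mem_of_mem_filter hk)]

-- invariant of A's base loop: with n bases left and 9-n divisors found so far,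
-- A's loop returns B's all-or-nothing record
theorem pvLoopJ_inv : ∀ n : Nat, n ≤ 9 → ∀ (coin : String) (divisors : List String)
    (solution : String) (scount : Int), divisors.length + n = 9 →
    pvLoopJA (PySem.List.pyRange (11 - n) 11 1) coin divisors solution scount =
      (pvDivsB (pvPrimesBelow (2 ^ 15)) (PySem.List.pyRange (11 - n) 11 1) coin).elim (solution, scount)
        (fun ds => if n = 0 then (solution, scount)
          else (solution ++ coin ++ " " ++ PySem.Str.join " " (divisors ++ ds) ++ "\n",
                scount + 1)) := by
  intro n
  induction n with
  | zero =>
    intro _ coin divisors solution scount _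
    rw [PySem.List.pyRange_one_eq_nil (by omega)]
    rfl
  | succ m ih =>
    intro hm coin divisors solution scount hlen
    have hcons : PySem.List.pyRange (11 - ((m : Nat) + 1 : Nat)) 11 1
        = ((10 : Int) - (m : Int)) :: PySem.List.pyRange (11 - (m : Int)) 11 1 := by
      rw [show (11 : Int) - ((m + 1 : Nat) : Int) = 10 - (m : Int) by push_cast; ring]
      rw [PySem.List.pyRange_one_cons (by omega)]
      rw [show (10 : Int) - (m : Int) + 1 = 11 - (m : Int) by ring]
    rw [hcons]
    simp only [pvLoopJA, pvDivsB, pvFindDiv_eq]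
    cases pvFindDivB (pvPrimesBelow (2 ^ 15)) (pvBase coin ((10 : Int) - (m : Int))) with
    | none =>
      rw [if_pos (by push_cast; omega)]
      simp only [Option.bind, Option.elim]
    | some k =>
      rw [if_neg (by push_cast [List.length_append, List.length_cons, List.length_nil]; omega)]
      by_cases hm0 : m = 0
      · subst hm0
        rw [if_pos (by simp only [List.length_append, List.length_cons, List.length_nil,
            beq_iff_eq]; omega)]
        rw [PySem.List.pyRange_one_eq_nil (by omega : (11 : Int) ≤ 11 - ((0 : Nat) : Int))]
        simp only [pvLoopJA, pvDivsB, Option.bind, Option.map, Option.elim]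
        rw [if_neg (by omega : ¬ (0 : Nat) + 1 = 0)]
      · rw [if_neg (by simp only [List.length_append, List.length_cons, List.length_nil,
            beq_iff_eq]; omega)]
        rw [ih (by omega) coin _ solution scount
          (by simp only [List.length_append, List.length_cons, List.length_nil]; omega)]
        cases pvDivsB (pvPrimesBelow (2 ^ 15)) (PySem.List.pyRange (11 - (m : Int)) 11 1) coin with
        | none => simp only [Option.bind, Option.map, Option.elim]
        | some ds =>
          simp only [Option.bind, Option.map, Option.elim, if_neg hm0,
            if_neg (by omega : ¬ m + 1 = 0), List.append_assoc, List.cons_append,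
            List.nil_append]

-- A's base loop on [2..10], started with the empty divisor list, is B's all-or-nothing record
theorem pvLoopJ_eq (coin : String) (solution : String) (scount : Int) :
    pvLoopJA (PySem.List.pyRange 2 11 1) coin [] solution scount =
      (pvDivsB (pvPrimesBelow (2 ^ 15)) (PySem.List.pyRange 2 11 1) coin).elim (solution, scount)
        (fun ds => (solution ++ coin ++ " " ++ PySem.Str.join " " ds ++ "\n", scount + 1)) := by
  have h := pvLoopJ_inv 9 (by omega) coin [] solution scount (by simp)
  norm_num at h
  exact h

theorem pvLoopI_eq (stop J : Int) : ∀ (n : Nat) (i : Int), (stop - i).toNat ≤ n →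
    ∀ (solution : String) (scount : Int),
    pvLoopIA stop J i solution scount
      = pvLoopIB (pvPrimesBelow (2 ^ 15)) stop J i solution scount := by
  intro n
  induction n with
  | zero =>
    intro i hi solution scount
    rw [pvLoopIA.eq_def, pvLoopIB.eq_def, dif_neg (by omega), dif_neg (by omega)]
  | succ m ih =>
    intro i hi solution scount
    rw [pvLoopIA.eq_def, pvLoopIB.eq_def]
    by_cases hc : i < stop
    · rw [dif_pos hc, dif_pos hc]
      by_cases h : (scount == J) = true
      · rw [if_pos h, if_pos h]
      · rw [if_neg h, if_neg h]
        show pvLoopIA stop J (i + 2)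
            (pvLoopJA (PySem.List.pyRange 2 11 1) (pvCoin i) [] solution scount).1
            (pvLoopJA (PySem.List.pyRange 2 11 1) (pvCoin i) [] solution scount).2
          = (pvDivsB (pvPrimesBelow (2 ^ 15)) (PySem.List.pyRange 2 11 1) (pvCoin i)).elim
              (pvLoopIB (pvPrimesBelow (2 ^ 15)) stop J (i + 2) solution scount)
              (fun ds => pvLoopIB (pvPrimesBelow (2 ^ 15)) stop J (i + 2)
                (solution ++ pvCoin i ++ " " ++ PySem.Str.join " " ds ++ "\n") (scount + 1))
        rw [pvLoopJ_eq]
        cases pvDivsB (pvPrimesBelow (2 ^ 15)) (PySem.List.pyRange 2 11 1) (pvCoin i) with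
        | none =>
          simp only [Option.elim]
          exact ih (i + 2) (by omega) solution scount
        | some ds =>
          simp only [Option.elim]
          exact ih (i + 2) (by omega) _ _
    · rw [dif_neg hc, dif_neg hc]

-- ===== VERDICT (by name: the statement is the Claim_ definition above) =====
theorem solve_spec : Claim_equal_solve := by
  intro N J _ _
  unfold Spec_solve solve solve_alt
  exact pvLoopI_eq (2 ^ N.toNat) J ((2 ^ N.toNat : Int) - (2 ^ (N - 1).toNat + 1)).toNat
    (2 ^ (N - 1).toNat + 1) (by omega) "" 0
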